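-- pv_equiv track=rewrite | github.com/pdim1950/order-batching-problem | model.py | get_all_feasible_combinations
-- ===== SOURCE A (Python) =====
-- def get_capacity_of_batch(batch):
--     return sum(i*j for i, j in batch)
--
-- def get_all_feasible_combinations(batches,C):
--     feasible = []
--     for pos1,batch1 in enumerate(batches[:-1]):
--         for pos2,batch2 in enumerate(batches[1:],1):
--             batch_c1 = get_capacity_of_batch(batch1)
--             batch_c2 = get_capacity_of_batch(batch2)
--
--             if pos1 != pos2 and batch_c1 + batch_c2 < C and (pos1,pos2) not in feasible and (pos2,pos1) not in feasible:
--                 feasible.append((pos1,pos2))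
--
--
--     return feasible
-- ===== SOURCE B (Python) =====
-- def get_all_feasible_combinations(batches, C):
--     caps = [sum(i * j for i, j in b) for b in batches]
--     return [(i, j)
--             for i, ci in enumerate(caps)
--             for j, cj in enumerate(caps)
--             if i < j and ci + cj < C]
-- ===== Notes on version B (the rewrite author's own statement) =====
-- stated objective: faster
-- what changed: B precomputes each batch's capacity once and emits pairs (i,j) with i<j directly by a double scan, eliminating A's per-pair capacity recomputation and its linear membership scans over the growing result list.
import Mathlib
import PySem

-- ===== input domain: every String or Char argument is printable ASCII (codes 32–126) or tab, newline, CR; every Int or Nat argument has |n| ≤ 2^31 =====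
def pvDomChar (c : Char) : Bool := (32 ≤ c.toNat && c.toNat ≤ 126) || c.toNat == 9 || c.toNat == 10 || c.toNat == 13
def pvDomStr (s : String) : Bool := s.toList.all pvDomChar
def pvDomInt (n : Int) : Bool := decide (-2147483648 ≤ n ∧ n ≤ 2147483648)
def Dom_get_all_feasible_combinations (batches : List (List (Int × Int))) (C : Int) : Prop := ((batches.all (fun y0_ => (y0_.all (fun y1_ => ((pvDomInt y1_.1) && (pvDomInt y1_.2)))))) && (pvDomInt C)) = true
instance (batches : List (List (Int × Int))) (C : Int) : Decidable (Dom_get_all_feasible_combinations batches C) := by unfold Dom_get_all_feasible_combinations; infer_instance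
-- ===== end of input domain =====

-- B precomputes each batch capacity once and emits the pairs i<j directly, removing
-- A's repeated capacity recomputation and the membership scans over the result list.

-- ===== PORT A =====
def get_capacity_of_batch (batch : List (Int × Int)) : Int :=
  (batch.map (fun p => p.1 * p.2)).sum

def get_all_feasible_combinations (batches : List (List (Int × Int))) (C : Int) : List (Int × Int) :=
  (PySem.List.enumerate (PySem.List.slice batches none (some (-1))) 0).foldl
    (fun feasible e1 =>
      (PySem.List.enumerate (PySem.List.slice batches (some 1) none) 1).foldl
        (fun feasible e2 =>
          let batch_c1 := get_capacity_of_batch e1.2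
          let batch_c2 := get_capacity_of_batch e2.2
          if e1.1 ≠ e2.1 ∧ batch_c1 + batch_c2 < C ∧ (e1.1, e2.1) ∉ feasible ∧ (e2.1, e1.1) ∉ feasible
          then feasible ++ [(e1.1, e2.1)] else feasible)
        feasible)
    []

-- ===== PORT B =====
def get_all_feasible_combinations_alt (batches : List (List (Int × Int))) (C : Int) : List (Int × Int) :=
  let caps := batches.map (fun b => (b.map (fun p => p.1 * p.2)).sum)
  (PySem.List.enumerate caps 0).flatMap (fun e1 =>
    ((PySem.List.enumerate caps 0).filter
        (fun e2 => decide (e1.1 < e2.1) && decide (e1.2 + e2.2 < C))).map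
      (fun e2 => (e1.1, e2.1)))

-- ===== PRECONDITION & SPEC =====
def Spec_get_all_feasible_combinations (batches : List (List (Int × Int))) (C : Int) (out : List (Int × Int)) : Prop := out = get_all_feasible_combinations_alt batches C
instance (batches : List (List (Int × Int))) (C : Int) (out : List (Int × Int)) : Decidable (Spec_get_all_feasible_combinations batches C out) := by unfold Spec_get_all_feasible_combinations; infer_instance

-- ===== CLAIM (what is proved, stated in full; the proofs are below) =====
def Claim_equal_get_all_feasible_combinations : Prop := ∀ (batches : List (List (Int × Int))) (C : Int), Dom_get_all_feasible_combinations batches C → Spec_get_all_feasible_combinations batches C (get_all_feasible_combinations batches C)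

-- ===== LEMMAS AND PROOFS =====

-- caps list as B computes it
def pvCaps (batches : List (List (Int × Int))) : List Int :=
  batches.map (fun b => (b.map (fun p => p.1 * p.2)).sum)

-- one row of B's comprehension
def pvRow (caps : List Int) (C : Int) (e1 : Int × Int) : List (Int × Int) :=
  ((PySem.List.enumerate caps 0).filter
      (fun e2 => decide (e1.1 < e2.1) && decide (e1.2 + e2.2 < C))).map
    (fun e2 => (e1.1, e2.1))

-- B's output restricted to the first p rows
def pvF (caps : List Int) (C : Int) (p : Nat) : List (Int × Int) :=
  (PySem.List.enumerate (caps.take p) 0).flatMap (pvRow caps C)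

lemma pv_caps_getElem (batches : List (List (Int × Int))) (i : Nat) (h : i < batches.length) :
    (pvCaps batches)[i]'(by simpa [pvCaps] using h) = get_capacity_of_batch batches[i] := by
  simp [pvCaps, get_capacity_of_batch]

lemma pv_mem_F (caps : List Int) (C : Int) (p : Nat) :
    ∀ q ∈ pvF caps C p, 0 ≤ q.1 ∧ q.1 < (p : Int) ∧ q.1 < q.2 := by
  intro q hq
  simp only [pvF, List.mem_flatMap] at hq
  obtain ⟨e1, he1, hq⟩ := hq
  rw [PySem.List.mem_enumerate_iff] at he1
  obtain ⟨k, hk, rfl⟩ := he1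
  simp only [pvRow, List.mem_map, List.mem_filter] at hq
  obtain ⟨e2, ⟨_, hcond⟩, rfl⟩ := hq
  have hk' : k < p := lt_of_lt_of_le hk (by simp [List.length_take])
  simp only [Bool.and_eq_true, decide_eq_true_eq] at hcond
  refine ⟨by simp, ?_, hcond.1⟩
  simp only [zero_add]
  exact_mod_cast hk'

lemma pv_mem_F_of (caps : List Int) (C : Int) (p i j : Nat)
    (hij : i < j) (hip : i < p) (hj : j < caps.length)
    (hc : caps[i]'(Nat.lt_trans hij hj) + caps[j] < C) :
    ((i : Int), (j : Int)) ∈ pvF caps C p := by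
  have hi : i < caps.length := Nat.lt_trans hij hj
  have hitake : i < (caps.take p).length := by simp [List.length_take]; omega
  simp only [pvF, List.mem_flatMap]
  refine ⟨((i : Int), (caps.take p)[i]), ?_, ?_⟩
  · rw [PySem.List.mem_enumerate_iff]
    exact ⟨i, hitake, by simp⟩
  · simp only [pvRow, List.mem_map, List.mem_filter]
    refine ⟨((j : Int), caps[j]), ⟨?_, ?_⟩, rfl⟩
    · rw [PySem.List.mem_enumerate_iff]
      exact ⟨j, hj, by simp⟩
    · simp only [Bool.and_eq_true, decide_eq_true_eq]
      constructor
      · exact_mod_cast hij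
      · simpa [List.getElem_take] using hc

-- the inner loop of A, with a feasible list that already contains exactly the
-- right earlier pairs, appends exactly B's row
lemma pv_inner (p c1 C : Int) :
    ∀ (es : List (Int × List (Int × Int))) (feas : List (Int × Int)),
    (∀ q ∈ feas, q.1 < q.2) →
    (∀ e ∈ es, e.1 < p → c1 + get_capacity_of_batch e.2 < C → (e.1, p) ∈ feas) →
    (∀ e ∈ es, p < e.1 → (p, e.1) ∉ feas) →
    es.Pairwise (fun a b => a.1 < b.1) →
    es.foldl
      (fun feasible e2 =>
        let batch_c1 := c1
        let batch_c2 := get_capacity_of_batch e2.2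
        if p ≠ e2.1 ∧ batch_c1 + batch_c2 < C ∧ (p, e2.1) ∉ feasible ∧ (e2.1, p) ∉ feasible
        then feasible ++ [(p, e2.1)] else feasible)
      feas
    = feas ++ (es.filter (fun e2 => decide (p < e2.1) && decide (c1 + get_capacity_of_batch e2.2 < C))).map
        (fun e2 => (p, e2.1)) := by
  intro es
  induction es with
  | nil => intro feas _ _ _ _; simp
  | cons e es ih =>
    intro feas h1 h2 h3 hp
    have hp' := (List.pairwise_cons.mp hp).2
    have hpe := (List.pairwise_cons.mp hp).1
    simp only [List.foldl_cons, List.filter_cons]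
    rcases lt_trichotomy p e.1 with hlt | heq | hgt
    · have hnot1 : (p, e.1) ∉ feas := h3 e (by simp) hlt
      have hnot2 : (e.1, p) ∉ feas := fun hm => absurd (h1 _ hm) (by simp; omega)
      by_cases hc : c1 + get_capacity_of_batch e.2 < C
      · rw [if_pos ⟨hlt.ne, hc, hnot1, hnot2⟩]
        rw [ih (feas ++ [(p, e.1)])
            (by intro q hq; rcases List.mem_append.mp hq with h | h
                · exact h1 q h
                · simp at h; subst h; exact hlt)
            (by intro e' he' hlt' hc'
                exact List.mem_append.mpr (Or.inl (h2 e' (by simp [he']) hlt' hc')))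
            (by intro e' he' hlt' hm
                rcases List.mem_append.mp hm with h | h
                · exact h3 e' (by simp [he']) hlt' h
                · simp at h
                  have := hpe e' he'
                  omega)
            hp']
        have : (decide (p < e.1) && decide (c1 + get_capacity_of_batch e.2 < C)) = true := by
          simp [hlt, hc]
        rw [this]
        simp
      · rw [if_neg (by intro h; exact hc h.2.1)]
        have : (decide (p < e.1) && decide (c1 + get_capacity_of_batch e.2 < C)) = false := by
          simp [hc]
        rw [this]
        exact ih feas h1 (fun e' he' => h2 e' (by simp [he'])) (fun e' he' => h3 e' (by simp [he'])) hp'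
    · rw [if_neg (by intro h; exact h.1 heq)]
      have : (decide (p < e.1) && decide (c1 + get_capacity_of_batch e.2 < C)) = false := by
        simp [heq]
      rw [this]
      exact ih feas h1 (fun e' he' => h2 e' (by simp [he'])) (fun e' he' => h3 e' (by simp [he'])) hp'
    · have : (decide (p < e.1) && decide (c1 + get_capacity_of_batch e.2 < C)) = false := by
        simp; intro h; omega
      rw [this]
      by_cases hc : c1 + get_capacity_of_batch e.2 < C
      · have hmem : (e.1, p) ∈ feas := h2 e (by simp) hgt hc
        rw [if_neg (by intro h; exact h.2.2.2 hmem)]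
        exact ih feas h1 (fun e' he' => h2 e' (by simp [he'])) (fun e' he' => h3 e' (by simp [he'])) hp'
      · rw [if_neg (by intro h; exact hc h.2.1)]
        exact ih feas h1 (fun e' he' => h2 e' (by simp [he'])) (fun e' he' => h3 e' (by simp [he'])) hp'

lemma pv_enumerate_map {α β : Type} (f : α → β) :
    ∀ (xs : List α) (s : Int),
    PySem.List.enumerate (xs.map f) s = (PySem.List.enumerate xs s).map (fun e => (e.1, f e.2)) := by
  intro xs
  induction xs with
  | nil => intro s; simp [PySem.List.enumerate_nil]
  | cons x xs ih => intro s; simp [PySem.List.enumerate_cons, ih]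

-- A's row at index p equals B's row at index p
lemma pv_row_eq (batches : List (List (Int × Int))) (C : Int) (p : Nat) (hp : p < batches.length) :
    ((PySem.List.enumerate batches.tail 1).filter
        (fun e2 => decide ((p : Int) < e2.1) && decide (get_capacity_of_batch batches[p] + get_capacity_of_batch e2.2 < C))).map
      (fun e2 => ((p : Int), e2.1))
    = pvRow (pvCaps batches) C ((p : Int), (pvCaps batches)[p]'(by simpa [pvCaps] using hp)) := by
  cases batches with
  | nil => simp at hp
  | cons b0 bt =>
    simp only [pvRow]
    rw [pv_caps_getElem _ p hp]
    conv_rhs => rw [show PySem.List.enumerate (pvCaps (b0 :: bt)) 0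
        = ((0 : Int), (b0.map (fun q => q.1*q.2)).sum) :: (PySem.List.enumerate bt 1).map (fun e => (e.1, (e.2.map (fun q => q.1*q.2)).sum)) from by
      rw [show pvCaps (b0 :: bt) = ((b0.map (fun q => q.1*q.2)).sum) :: bt.map (fun b => (b.map (fun q => q.1*q.2)).sum) from by simp [pvCaps],
          PySem.List.enumerate_cons, pv_enumerate_map]; norm_num]
    rw [List.filter_cons]
    rw [if_neg (by simp)]
    rw [List.filter_map, List.map_map]
    simp only [List.tail_cons, Function.comp_def, get_capacity_of_batch]
    rfl

lemma pv_F_succ (caps : List Int) (C : Int) (p : Nat) (hp : p < caps.length) :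
    pvF caps C (p + 1) = pvF caps C p ++ pvRow caps C ((p : Int), caps[p]) := by
  unfold pvF
  rw [List.take_add_one, List.getElem?_eq_getElem hp]
  rw [PySem.List.enumerate_append, List.flatMap_append]
  rw [show (0 : Int) + ((caps.take p).length : Int) = (p : Int) from by
    simp [List.length_take]; omega]
  simp [PySem.List.enumerate_cons, PySem.List.enumerate_nil]

lemma pv_row_out (caps : List Int) (C : Int) (i c : Int) (hi : (caps.length : Int) ≤ i + 1) :
    pvRow caps C (i, c) = [] := by
  unfold pvRow
  rw [List.filter_eq_nil_iff.mpr, List.map_nil]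
  intro e2 he2
  rw [PySem.List.mem_enumerate_iff] at he2
  obtain ⟨k, hk, rfl⟩ := he2
  simp only [Bool.and_eq_true, decide_eq_true_eq, not_and]
  intro hlt
  omega

-- the outer loop maintains the invariant "the first p rows are done"
lemma pv_outer (batches : List (List (Int × Int))) (C : Int) :
    ∀ (bs : List (List (Int × Int))) (p : Nat), batches.dropLast.drop p = bs →
    (PySem.List.enumerate bs (p : Int)).foldl
      (fun feasible e1 =>
        (PySem.List.enumerate (PySem.List.slice batches (some 1) none) 1).foldl
          (fun feasible e2 =>
            let batch_c1 := get_capacity_of_batch e1.2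
            let batch_c2 := get_capacity_of_batch e2.2
            if e1.1 ≠ e2.1 ∧ batch_c1 + batch_c2 < C ∧ (e1.1, e2.1) ∉ feasible ∧ (e2.1, e1.1) ∉ feasible
            then feasible ++ [(e1.1, e2.1)] else feasible)
          feasible)
      (pvF (pvCaps batches) C p)
    = pvF (pvCaps batches) C (p + bs.length) := by
  intro bs
  induction bs with
  | nil => intro p h; simp [PySem.List.enumerate_nil]
  | cons b bs ih =>
    intro p h
    have hplen : p < batches.dropLast.length := by
      rcases Nat.lt_or_ge p batches.dropLast.length with h' | h'
      · exact h'
      · rw [List.drop_eq_nil_of_le h'] at h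
        simp at h
    have hp1 : p < batches.length := lt_of_lt_of_le hplen (by simp [List.length_dropLast])
    have hcaps : p < (pvCaps batches).length := by simpa [pvCaps] using hp1
    have hb : batches[p]'hp1 = b := by
      have h1 : batches.dropLast[p + 0]? = some b := by
        rw [← List.getElem?_drop, h]; rfl
      rw [List.getElem?_eq_getElem (by simpa using hplen)] at h1
      have h2 := Option.some.inj h1
      rw [List.getElem_dropLast] at h2
      simpa using h2
    rw [PySem.List.enumerate_cons, List.foldl_cons, PySem.List.slice_from_one]
    show (PySem.List.enumerate bs ((p : Int) + 1)).foldl _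
      ((PySem.List.enumerate batches.tail 1).foldl
        (fun feasible e2 =>
          let batch_c1 := get_capacity_of_batch b
          let batch_c2 := get_capacity_of_batch e2.2
          if (p : Int) ≠ e2.1 ∧ batch_c1 + batch_c2 < C ∧ ((p : Int), e2.1) ∉ feasible ∧ (e2.1, (p : Int)) ∉ feasible
          then feasible ++ [((p : Int), e2.1)] else feasible)
        (pvF (pvCaps batches) C p)) = _
    rw [← hb]
    rw [pv_inner ((p : Int)) (get_capacity_of_batch (batches[p]'hp1)) C (PySem.List.enumerate batches.tail 1)
        (pvF (pvCaps batches) C p)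
        (fun q hq => (pv_mem_F _ _ _ q hq).2.2)
        ?h2
        (fun e he hlt hm => absurd (pv_mem_F _ _ _ _ hm).2.1 (by simp))
        (PySem.List.pairwise_lt_enumerate _ _)]
    case h2 =>
      intro e he hlt hc
      rw [PySem.List.mem_enumerate_iff] at he
      obtain ⟨k, hk, rfl⟩ := he
      have hk1 : k + 1 < p := by
        simp only at hlt
        omega
      have hkb : k + 1 < batches.length := by
        simp [List.length_tail] at hk ⊢
        omega
      have hmem := pv_mem_F_of (pvCaps batches) C p (k + 1) p
        (by omega) (by omega) hcaps ?_
      · have hcast : ((1 : Int) + (k : Int)) = ((k + 1 : Nat) : Int) := by push_cast; ring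
        simpa [hcast] using hmem
      · rw [pv_caps_getElem _ _ hkb, pv_caps_getElem _ _ hp1]
        have : batches.tail[k]'hk = batches[k + 1]'hkb := by
          rw [List.getElem_tail]
        simp only at hc
        rw [this] at hc
        omega
    rw [pv_row_eq batches C p hp1]
    rw [show pvRow (pvCaps batches) C ((p : Int), (pvCaps batches)[p]'(by simpa [pvCaps] using hp1))
        = pvRow (pvCaps batches) C ((p : Int), (pvCaps batches)[p]'hcaps) from rfl]
    rw [← pv_F_succ (pvCaps batches) C p hcaps]
    have hdrop : batches.dropLast.drop (p + 1) = bs := by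
      have : batches.dropLast.drop (p + 1) = (batches.dropLast.drop p).drop 1 := by
        rw [List.drop_drop]
      rw [this, h]
      rfl
    have hih := ih (p + 1) hdrop
    rw [PySem.List.slice_from_one] at hih
    rw [show ((p : Int) + 1) = ((p + 1 : Nat) : Int) from by push_cast; ring]
    rw [hih]
    congr 1
    simp [List.length_cons]
    omega

lemma pv_F_zero (caps : List Int) (C : Int) : pvF caps C 0 = [] := by
  simp [pvF, PySem.List.enumerate_nil]

lemma pv_alt_eq (batches : List (List (Int × Int))) (C : Int) :
    get_all_feasible_combinations_alt batches C = pvF (pvCaps batches) C (pvCaps batches).length := by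
  simp only [get_all_feasible_combinations_alt, pvF, pvCaps, List.take_length]
  rfl

lemma pv_F_dropLast (batches : List (List (Int × Int))) (C : Int) :
    pvF (pvCaps batches) C batches.dropLast.length = pvF (pvCaps batches) C (pvCaps batches).length := by
  cases batches with
  | nil => rfl
  | cons b0 bt =>
    have hlen : (pvCaps (b0 :: bt)).length = bt.length + 1 := by simp [pvCaps]
    have hlast : bt.length < (pvCaps (b0 :: bt)).length := by omega
    rw [List.length_dropLast, List.length_cons]
    simp only [Nat.add_sub_cancel]
    rw [show (pvCaps (b0 :: bt)).length = bt.length + 1 from hlen]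
    rw [pv_F_succ _ C bt.length hlast]
    rw [pv_row_out _ C _ _ (by omega)]
    simp

theorem pv_main (batches : List (List (Int × Int))) (C : Int) :
    get_all_feasible_combinations batches C = get_all_feasible_combinations_alt batches C := by
  rw [pv_alt_eq, ← pv_F_dropLast]
  unfold get_all_feasible_combinations
  rw [PySem.List.slice_to_neg_one]
  have h0 := pv_outer batches C batches.dropLast 0 (by simp)
  rw [Nat.cast_zero] at h0
  rw [← pv_F_zero (pvCaps batches) C] at *
  rw [h0]
  simp

-- ===== VERDICT (by name: the statement is the Claim_ definition above) =====
theorem get_all_feasible_combinations_spec : Claim_equal_get_all_feasible_combinations := by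
  intro batches C _
  unfold Spec_get_all_feasible_combinations
  exact pv_main batches C
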